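-- pv_equiv track=rewrite | github.com/hanzhenzhujene/ConfessionAI | src/offtherails_pilot/dataset_checks.py | summarize_binary_balance
-- ===== SOURCE A (Python) =====
-- from typing import Dict, List
--
-- def summarize_binary_balance(items: List[Dict[str, str]]) -> Dict[str, int]:
--     return {
--         "perm_pos": sum(row.get("gold_perm_binary", "") == "1" for row in items),
--         "perm_neg": sum(row.get("gold_perm_binary", "") == "0" for row in items),
--         "perm_amb": sum(row.get("binary_eval_perm", "") == "0" for row in items),
--         "intent_pos": sum(row.get("gold_intent_binary", "") == "1" for row in items),
--         "intent_neg": sum(row.get("gold_intent_binary", "") == "0" for row in items),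
--         "intent_amb": sum(row.get("binary_eval_intent", "") == "0" for row in items),
--     }
-- ===== SOURCE B (Python) =====
-- from typing import Dict, List
--
-- def summarize_binary_balance(items: List[Dict[str, str]]) -> Dict[str, int]:
--     pp = pn = pa = ip = inn = ia = 0
--     for row in items:
--         gp = row.get("gold_perm_binary", "")
--         gi = row.get("gold_intent_binary", "")
--         if gp == "1":
--             pp += 1
--         elif gp == "0":
--             pn += 1
--         if row.get("binary_eval_perm", "") == "0":
--             pa += 1
--         if gi == "1":
--             ip += 1
--         elif gi == "0":
--             inn += 1
--         if row.get("binary_eval_intent", "") == "0":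
--             ia += 1
--     return {
--         "perm_pos": pp,
--         "perm_neg": pn,
--         "perm_amb": pa,
--         "intent_pos": ip,
--         "intent_neg": inn,
--         "intent_amb": ia,
--     }
-- ===== Notes on version B (the rewrite author's own statement) =====
-- stated objective: alternative
-- what changed: Six separate full scans of items (one per counter) are replaced by a single pass carrying six integer accumulators, reading each relevant field once per row.
import Mathlib
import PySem

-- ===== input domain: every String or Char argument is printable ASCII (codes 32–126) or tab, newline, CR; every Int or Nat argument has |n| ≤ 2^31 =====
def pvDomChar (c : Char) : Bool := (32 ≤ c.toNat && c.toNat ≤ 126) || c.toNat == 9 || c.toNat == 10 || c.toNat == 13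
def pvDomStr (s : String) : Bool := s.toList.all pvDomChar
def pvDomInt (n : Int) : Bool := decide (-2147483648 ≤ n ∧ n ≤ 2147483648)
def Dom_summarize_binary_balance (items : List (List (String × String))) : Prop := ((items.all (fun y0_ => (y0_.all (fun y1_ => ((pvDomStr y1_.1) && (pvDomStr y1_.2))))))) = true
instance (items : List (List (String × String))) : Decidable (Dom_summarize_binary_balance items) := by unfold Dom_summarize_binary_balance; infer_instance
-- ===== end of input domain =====

-- Header: B replaces A's six per-key scans over items with a single pass carrying six counters (objective: alternative decomposition, same cost).
-- ===== PORT A =====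
def summarize_binary_balance (items : List (List (String × String))) : List (String × Int) :=
  [("perm_pos", items.foldl (fun acc row => acc + (if PySem.Dict.getD (PySem.Dict.mk row) "gold_perm_binary" "" == "1" then 1 else 0)) 0),
   ("perm_neg", items.foldl (fun acc row => acc + (if PySem.Dict.getD (PySem.Dict.mk row) "gold_perm_binary" "" == "0" then 1 else 0)) 0),
   ("perm_amb", items.foldl (fun acc row => acc + (if PySem.Dict.getD (PySem.Dict.mk row) "binary_eval_perm" "" == "0" then 1 else 0)) 0),
   ("intent_pos", items.foldl (fun acc row => acc + (if PySem.Dict.getD (PySem.Dict.mk row) "gold_intent_binary" "" == "1" then 1 else 0)) 0),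
   ("intent_neg", items.foldl (fun acc row => acc + (if PySem.Dict.getD (PySem.Dict.mk row) "gold_intent_binary" "" == "0" then 1 else 0)) 0),
   ("intent_amb", items.foldl (fun acc row => acc + (if PySem.Dict.getD (PySem.Dict.mk row) "binary_eval_intent" "" == "0" then 1 else 0)) 0)]

-- ===== PORT B =====
def sbbStep (acc : Int × Int × Int × Int × Int × Int) (row : List (String × String)) :
    Int × Int × Int × Int × Int × Int :=
  let (pp, pn, pa, ip, inn, ia) := acc
  let gp := PySem.Dict.getD (PySem.Dict.mk row) "gold_perm_binary" ""
  let gi := PySem.Dict.getD (PySem.Dict.mk row) "gold_intent_binary" ""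
  let (pp, pn) := if gp == "1" then (pp + 1, pn) else if gp == "0" then (pp, pn + 1) else (pp, pn)
  let pa := if PySem.Dict.getD (PySem.Dict.mk row) "binary_eval_perm" "" == "0" then pa + 1 else pa
  let (ip, inn) := if gi == "1" then (ip + 1, inn) else if gi == "0" then (ip, inn + 1) else (ip, inn)
  let ia := if PySem.Dict.getD (PySem.Dict.mk row) "binary_eval_intent" "" == "0" then ia + 1 else ia
  (pp, pn, pa, ip, inn, ia)

def summarize_binary_balance_alt (items : List (List (String × String))) : List (String × Int) :=
  let (pp, pn, pa, ip, inn, ia) := items.foldl sbbStep (0, 0, 0, 0, 0, 0)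
  [("perm_pos", pp), ("perm_neg", pn), ("perm_amb", pa),
   ("intent_pos", ip), ("intent_neg", inn), ("intent_amb", ia)]

-- ===== PRECONDITION & SPEC =====
def Spec_summarize_binary_balance (items : List (List (String × String))) (out : List (String × Int)) : Prop := out = summarize_binary_balance_alt items
instance (items : List (List (String × String))) (out : List (String × Int)) : Decidable (Spec_summarize_binary_balance items out) := by unfold Spec_summarize_binary_balance; infer_instance

-- ===== CLAIM (what is proved, stated in full; the proofs are below) =====
def Claim_equal_summarize_binary_balance : Prop := ∀ (items : List (List (String × String))), Dom_summarize_binary_balance items → Spec_summarize_binary_balance items (summarize_binary_balance items)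

-- ===== LEMMAS AND PROOFS =====
theorem sbb_foldl_shift {α : Type} (g : α → Int) (l : List α) (c : Int) :
    l.foldl (fun acc row => acc + g row) c = c + l.foldl (fun acc row => acc + g row) 0 := by
  induction l generalizing c with
  | nil => simp
  | cons x xs ih => simp only [List.foldl_cons]; rw [ih (c + g x), ih (0 + g x)]; ring

theorem sbbStep_eq (pp pn pa ip inn ia : Int) (row : List (String × String)) :
    sbbStep (pp, pn, pa, ip, inn, ia) row =
      (pp + (if PySem.Dict.getD (PySem.Dict.mk row) "gold_perm_binary" "" == "1" then 1 else 0),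
       pn + (if PySem.Dict.getD (PySem.Dict.mk row) "gold_perm_binary" "" == "0" then 1 else 0),
       pa + (if PySem.Dict.getD (PySem.Dict.mk row) "binary_eval_perm" "" == "0" then 1 else 0),
       ip + (if PySem.Dict.getD (PySem.Dict.mk row) "gold_intent_binary" "" == "1" then 1 else 0),
       inn + (if PySem.Dict.getD (PySem.Dict.mk row) "gold_intent_binary" "" == "0" then 1 else 0),
       ia + (if PySem.Dict.getD (PySem.Dict.mk row) "binary_eval_intent" "" == "0" then 1 else 0)) := by
  simp only [sbbStep]
  split_ifs <;> simp_all

theorem sbb_fold_eq (items : List (List (String × String)))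
    (pp pn pa ip inn ia : Int) :
    items.foldl sbbStep (pp, pn, pa, ip, inn, ia) =
      (pp + items.foldl (fun acc row => acc + (if PySem.Dict.getD (PySem.Dict.mk row) "gold_perm_binary" "" == "1" then 1 else 0)) 0,
       pn + items.foldl (fun acc row => acc + (if PySem.Dict.getD (PySem.Dict.mk row) "gold_perm_binary" "" == "0" then 1 else 0)) 0,
       pa + items.foldl (fun acc row => acc + (if PySem.Dict.getD (PySem.Dict.mk row) "binary_eval_perm" "" == "0" then 1 else 0)) 0,
       ip + items.foldl (fun acc row => acc + (if PySem.Dict.getD (PySem.Dict.mk row) "gold_intent_binary" "" == "1" then 1 else 0)) 0,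
       inn + items.foldl (fun acc row => acc + (if PySem.Dict.getD (PySem.Dict.mk row) "gold_intent_binary" "" == "0" then 1 else 0)) 0,
       ia + items.foldl (fun acc row => acc + (if PySem.Dict.getD (PySem.Dict.mk row) "binary_eval_intent" "" == "0" then 1 else 0)) 0) := by
  induction items generalizing pp pn pa ip inn ia with
  | nil => simp
  | cons row rest ih =>
    simp only [List.foldl_cons]
    rw [sbbStep_eq, ih]
    simp only [Prod.mk.injEq]
    refine ⟨?_, ?_, ?_, ?_, ?_, ?_⟩ <;> (conv_rhs => rw [sbb_foldl_shift]) <;> ring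

-- ===== VERDICT (by name: the statement is the Claim_ definition above) =====
theorem summarize_binary_balance_spec : Claim_equal_summarize_binary_balance := by
  intro items _
  unfold Spec_summarize_binary_balance summarize_binary_balance summarize_binary_balance_alt
  rw [sbb_fold_eq]
  simp
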